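-- pv_equiv track=rewrite | github.com/FerdikaPradana/Tugas_Programing_Sinyal_2 | konvolusi/konvolusi.py | konvolusi
-- ===== SOURCE A (Python) =====
-- def konvolusi(sig1, sig2):
--     x_n = sig1[:]
--     h_n = sig2[:]
--     h_n.reverse()
--     panjang_y_n = len(x_n) + len(h_n) -1
--     y_n = []
--     for i in range(panjang_y_n-len(h_n)):
--         h_n.append(0)
--     for i in range(panjang_y_n-len(x_n)):
--         x_n.insert(0, 0)
--     for i in range(panjang_y_n):
--         flag = 0
--         for j in range(panjang_y_n):
--             flag += x_n[j]*h_n[j]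
--         y_n.append(flag)
--         flag = 0
--         h_n.insert(0, 0)
--     return y_n
-- ===== SOURCE B (Python) =====
-- def konvolusi(sig1, sig2):
--     m, n = len(sig1), len(sig2)
--     return [sum(sig1[k] * sig2[i - k] for k in range(max(0, i - n + 1), min(m, i + 1)))
--             for i in range(m + n - 1)]
-- ===== Notes on version B (the rewrite author's own statement) =====
-- stated objective: faster
-- what changed: Replaces A's pad-reverse-and-slide scheme (which pads both sequences to full output length and sums m+n-1 products per output sample) with the direct convolution formula y[i] = sum over the overlap of sig1[k]*sig2[i-k], summing only the nonzero overlap.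
import Mathlib
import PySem

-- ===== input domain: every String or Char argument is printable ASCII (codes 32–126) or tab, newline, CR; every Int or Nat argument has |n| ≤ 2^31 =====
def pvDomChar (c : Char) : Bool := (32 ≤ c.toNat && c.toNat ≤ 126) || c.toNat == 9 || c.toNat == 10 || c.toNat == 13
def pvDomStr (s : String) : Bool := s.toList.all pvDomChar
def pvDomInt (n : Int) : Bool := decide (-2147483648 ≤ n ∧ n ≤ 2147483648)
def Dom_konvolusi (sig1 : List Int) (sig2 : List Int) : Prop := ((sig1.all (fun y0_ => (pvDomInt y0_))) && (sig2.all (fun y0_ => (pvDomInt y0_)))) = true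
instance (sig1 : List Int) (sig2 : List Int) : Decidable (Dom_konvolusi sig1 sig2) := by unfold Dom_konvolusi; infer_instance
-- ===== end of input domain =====

-- B replaces A's pad-reverse-and-slide convolution (m+n-1 products per output sample)
-- with the direct convolution formula summing only the overlap: objective = faster (O(m*n) vs O((m+n)^2)).

-- ===== PORT A =====
-- literal transliteration of A: copy, reverse h, pad h on the right and x on the left
-- to full length, then for each i take the full dot product and shift h right.
def konvolusi (sig1 : List Int) (sig2 : List Int) : List Int :=
  let x0 := sig1
  let h0 := sig2.reverse
  let panjang : Int := (x0.length : Int) + (h0.length : Int) - 1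
  let h1 := (PySem.List.pyRange 0 (panjang - (h0.length : Int)) 1).foldl
      (fun h _ => h ++ [0]) h0
  let x1 := (PySem.List.pyRange 0 (panjang - (x0.length : Int)) 1).foldl
      (fun x _ => 0 :: x) x0
  let st := (PySem.List.pyRange 0 panjang 1).foldl
      (fun (st : List Int × List Int) _ =>
        let flag := (PySem.List.pyRange 0 panjang 1).foldl
          (fun f j => f + PySem.List.pyGetD x1 j 0 * PySem.List.pyGetD st.2 j 0) 0
        (st.1 ++ [flag], 0 :: st.2))
      (([] : List Int), h1)
  st.1

-- ===== PORT B =====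
-- literal transliteration of B: y[i] = sum of sig1[k]*sig2[i-k] over the overlap window.
def konvolusi_alt (sig1 : List Int) (sig2 : List Int) : List Int :=
  let m : Int := sig1.length
  let n : Int := sig2.length
  (PySem.List.pyRange 0 (m + n - 1) 1).map (fun i =>
    (PySem.List.pyRange (max 0 (i - n + 1)) (min m (i + 1)) 1).foldl
      (fun acc k => acc + PySem.List.pyGetD sig1 k 0 * PySem.List.pyGetD sig2 (i - k) 0) 0)

-- ===== PRECONDITION & SPEC =====
def Spec_konvolusi (sig1 : List Int) (sig2 : List Int) (out : List Int) : Prop := out = konvolusi_alt sig1 sig2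
instance (sig1 : List Int) (sig2 : List Int) (out : List Int) : Decidable (Spec_konvolusi sig1 sig2 out) := by unfold Spec_konvolusi; infer_instance

-- ===== CLAIM (what is proved, stated in full; the proofs are below) =====
def Claim_equal_konvolusi : Prop := ∀ (sig1 : List Int) (sig2 : List Int), Dom_konvolusi sig1 sig2 → Spec_konvolusi sig1 sig2 (konvolusi sig1 sig2)

-- ===== LEMMAS AND PROOFS =====

-- zero-padded lookup of sig2: the value A's padded/shifted h provides at offset t
def pvB (sig2 : List Int) (t : Int) : Int :=
  if 0 ≤ t ∧ t < (sig2.length : Int) then sig2.getD t.toNat 0 else 0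

-- the common closed form both ports are reduced to: the i-th convolution sample
def pvC (sig1 sig2 : List Int) (i : Int) : Int :=
  ∑ k ∈ Finset.range sig1.length, sig1.getD k 0 * pvB sig2 (i - (k : Int))

lemma pv_pad_right (l : List Int) (h0 : List Int) :
    l.foldl (fun h _ => h ++ [(0 : Int)]) h0 = h0 ++ List.replicate l.length 0 := by
  induction l generalizing h0 with
  | nil => simp
  | cons x t ih => simp [ih, List.replicate_succ]

lemma pv_pad_left (l : List Int) (x0 : List Int) :
    l.foldl (fun x _ => (0 : Int) :: x) x0 = List.replicate l.length 0 ++ x0 := by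
  induction l generalizing x0 with
  | nil => simp
  | cons x t ih => simp [ih, List.replicate_succ']

lemma pv_outer_loop (F : List Int → Int) (l : List Int) (acc h : List Int) :
    l.foldl (fun st _ => (st.1 ++ [F st.2], (0 : Int) :: st.2)) (acc, h)
      = (acc ++ (List.range l.length).map (fun k => F (List.replicate k 0 ++ h)),
         List.replicate l.length 0 ++ h) := by
  induction l generalizing acc h with
  | nil => simp
  | cons x t ih =>
      simp only [List.foldl_cons, ih, List.length_cons, List.range_succ_eq_map,
        List.map_cons, List.map_map]
      refine Prod.ext ?_ ?_
      · simp only [List.replicate_zero, List.nil_append, List.append_assoc,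
          List.singleton_append]
        congr 2
        exact List.map_congr_left (fun k _ => by
          simp [Function.comp, List.replicate_succ', List.append_assoc])
      · simp [List.replicate_succ', List.append_assoc]

lemma pv_sum_map_range (g : ℕ → Int) (N : ℕ) :
    ((List.range N).map g).sum = ∑ k ∈ Finset.range N, g k := by
  induction N with
  | zero => simp
  | succ N ih => simp [List.range_succ, Finset.sum_range_succ, ih]

lemma pv_getD_rep_lt (q j : ℕ) (xs : List Int) (h : j < q) :
    (List.replicate q (0 : Int) ++ xs).getD j 0 = 0 := by
  rw [List.getD_append _ _ _ j (by simpa using h)]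
  simp [List.getD_eq_getElem?_getD, h]

lemma pv_getD_rep_ge (q j : ℕ) (xs : List Int) (h : q ≤ j) :
    (List.replicate q (0 : Int) ++ xs).getD j 0 = xs.getD (j - q) 0 := by
  rw [List.getD_append_right _ _ _ j (by simpa using h)]
  simp

-- the padded, i-shifted reversed sig2 evaluated at j is pvB at i + n - 1 - j
lemma pv_hVal (sig2 : List Int) (r i j : ℕ) :
    (List.replicate i (0 : Int) ++ (sig2.reverse ++ List.replicate r 0)).getD j 0
      = pvB sig2 ((i : Int) + sig2.length - 1 - j) := by
  by_cases h1 : j < i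
  · rw [pv_getD_rep_lt _ _ _ h1, pvB, if_neg (by omega)]
  · rw [pv_getD_rep_ge _ _ _ (Nat.le_of_not_lt h1)]
    by_cases h2 : j - i < sig2.length
    · rw [List.getD_append _ _ _ _ (by simpa using h2)]
      rw [List.getD_eq_getElem?_getD, List.getElem?_eq_getElem (by simpa using h2)]
      rw [List.getElem_reverse]
      rw [pvB, if_pos (by omega)]
      rw [List.getD_eq_getElem?_getD,
        List.getElem?_eq_getElem (by simp; omega)]
      simp only [Option.getD_some]
      congr 1
      omega
    · rw [List.getD_append_right _ _ _ _ (by simp; omega)]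
      rw [pvB, if_neg (by omega)]
      simp only [List.getD_eq_getElem?_getD, List.getElem?_replicate,
        List.length_reverse]
      split <;> rfl

-- A's i-th inner dot product, as a Finset sum, equals the closed form pvC
lemma pv_A_entry (sig1 sig2 : List Int) (i : ℕ) :
    ∑ j ∈ Finset.range (sig1.length + sig2.length - 1),
      (List.replicate (sig2.length - 1) (0 : Int) ++ sig1).getD j 0
        * pvB sig2 ((i : Int) + sig2.length - 1 - j)
      = pvC sig1 sig2 i := by
  by_cases hn : sig2.length = 0
  · rw [pvC]
    rw [Finset.sum_eq_zero, Finset.sum_eq_zero]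
    · intro k _; rw [pvB, if_neg (by omega)]; ring
    · intro j _; rw [pvB, if_neg (by omega)]; ring
  · have h1 : 1 ≤ sig2.length := by omega
    have hq : sig2.length - 1 ≤ sig1.length + sig2.length - 1 := by omega
    rw [Finset.range_eq_Ico,
      ← Finset.sum_Ico_consecutive _ (Nat.zero_le (sig2.length - 1)) hq]
    rw [Finset.sum_eq_zero (fun j hj => by
      rw [pv_getD_rep_lt _ _ _ (Finset.mem_Ico.1 hj).2]; ring), zero_add]
    rw [Finset.sum_Ico_eq_sum_range]
    have hm : sig1.length + sig2.length - 1 - (sig2.length - 1) = sig1.length := by omega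
    rw [hm, pvC]
    refine Finset.sum_congr rfl (fun k _ => ?_)
    rw [pv_getD_rep_ge _ _ _ (Nat.le_add_right _ _)]
    congr 1
    · congr 1; omega
    · congr 1; push_cast [h1]; omega

-- B's i-th inner fold equals the same closed form pvC
lemma pv_B_entry (sig1 sig2 : List Int) (i : ℕ) :
    (PySem.List.pyRange (max 0 ((i : Int) - sig2.length + 1))
        (min (sig1.length : Int) ((i : Int) + 1)) 1).foldl
      (fun acc k => acc + PySem.List.pyGetD sig1 k 0
          * PySem.List.pyGetD sig2 ((i : Int) - k) 0) 0
      = pvC sig1 sig2 i := by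
  set L : Int := max 0 ((i : Int) - sig2.length + 1) with hL
  set H : Int := min (sig1.length : Int) ((i : Int) + 1) with hH
  have hL0 : 0 ≤ L := le_max_left _ _
  have hH0 : 0 ≤ H := by omega
  have hHm : H ≤ (sig1.length : Int) := min_le_left _ _
  rw [PySem.List.foldl_add, PySem.List.pyRange_one, List.map_map, pv_sum_map_range,
    zero_add]
  have hstep : ∀ k ∈ Finset.range (H - L).toNat,
      PySem.List.pyGetD sig1 (L + (k : Int)) 0
          * PySem.List.pyGetD sig2 ((i : Int) - (L + (k : Int))) 0
        = sig1.getD (L.toNat + k) 0 * pvB sig2 ((i : Int) - (L.toNat + k : ℕ)) := by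
    intro k hk
    have hk' : (k : Int) < H - L := by
      have := Finset.mem_range.1 hk; omega
    have e1 : L + (k : Int) = ((L.toNat + k : ℕ) : Int) := by push_cast; omega
    have hlo : 0 ≤ (i : Int) - (L + (k : Int)) := by omega
    have hhi : (i : Int) - (L + (k : Int)) < (sig2.length : Int) := by omega
    rw [e1, PySem.List.pyGetD_natCast]
    congr 1
    have e2 : (i : Int) - ((L.toNat + k : ℕ) : Int)
        = ((((i : Int) - ((L.toNat + k : ℕ) : Int)).toNat : ℕ) : Int) := by omega
    rw [e2, PySem.List.pyGetD_natCast, pvB, if_pos (by omega)]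
    rw [Int.toNat_natCast]
  simp only [Function.comp]
  rw [Finset.sum_congr rfl hstep]
  have ht : (H - L).toNat = H.toNat - L.toNat := by omega
  rw [ht, ← Finset.sum_Ico_eq_sum_range
    (fun j => sig1.getD j 0 * pvB sig2 ((i : Int) - (j : Int))) L.toNat H.toNat, pvC]
  refine Finset.sum_subset ?_ ?_
  · intro k hk
    have := Finset.mem_Ico.1 hk
    refine Finset.mem_range.2 (by omega)
  · intro k hk hk'
    have h1 := Finset.mem_range.1 hk
    rw [Finset.mem_Ico, not_and_or] at hk'
    rw [pvB, if_neg (by omega)]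
    ring

-- ===== VERDICT (by name: the statement is the Claim_ definition above) =====
theorem konvolusi_spec : Claim_equal_konvolusi := by
  intro sig1 sig2 _dom
  show konvolusi sig1 sig2 = konvolusi_alt sig1 sig2
  unfold konvolusi konvolusi_alt
  simp only [List.length_reverse]
  rw [pv_pad_right, pv_pad_left,
    pv_outer_loop (fun h =>
      (PySem.List.pyRange 0 ((sig1.length : Int) + (sig2.length : Int) - 1) 1).foldl
        (fun f j => f + PySem.List.pyGetD
            (List.replicate
              (PySem.List.pyRange 0
                ((sig1.length : Int) + (sig2.length : Int) - 1 - (sig1.length : Int)) 1).length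
              0 ++ sig1) j 0
          * PySem.List.pyGetD h j 0) 0)]
  simp only [List.nil_append, PySem.List.length_pyRange_one]
  rw [PySem.List.pyRange_one 0 ((sig1.length : Int) + (sig2.length : Int) - 1),
    List.map_map]
  refine List.map_congr_left (fun i hi => ?_)
  simp only [Function.comp, zero_add]
  rw [PySem.List.foldl_add, List.map_map, pv_sum_map_range, zero_add]
  have eN : ((sig1.length : Int) + sig2.length - 1 - 0).toNat
      = sig1.length + sig2.length - 1 := by omega
  have eq' : ((sig1.length : Int) + sig2.length - 1 - sig1.length - 0).toNat
      = sig2.length - 1 := by omega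
  rw [eN, eq', pv_B_entry, ← pv_A_entry sig1 sig2 i]
  refine Finset.sum_congr rfl (fun j hj => ?_)
  simp only [Function.comp]
  rw [PySem.List.pyGetD_natCast, PySem.List.pyGetD_natCast, pv_hVal]
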